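-- pv_equiv track=rewrite | github.com/cricketclub/gridspace-stanford-harper-valley | experiments/src/datasets/harper_valley.py | process_speaker_ids
-- ===== SOURCE A (Python) =====
-- from collections import Counter
--
-- def process_speaker_ids(data, min_freq=10):
--     # speaker ids arent balanced... collapse everything
--     # that speaks less than 10 times
--     speaker_ids = [row['speaker_id'] for row in data]
--     speaker_freq = dict(Counter(speaker_ids))
--     valid_speaker_ids = []
--     invalid_speaker_ids = []
--
--     for speaker_id, freq in speaker_freq.items():
--         if freq <= min_freq:
--             invalid_speaker_ids.append(speaker_id)
--         else:
--             valid_speaker_ids.append(speaker_id)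
--
--     valid_speaker_ids = sorted(list(set(valid_speaker_ids)))
--     invalid_speaker_ids = sorted(list(set(invalid_speaker_ids)))
--
--     return valid_speaker_ids, invalid_speaker_ids
-- ===== SOURCE B (Python) =====
-- def process_speaker_ids(data, min_freq=10):
--     # Sort all speaker ids once, then scan maximal runs of equal ids:
--     # each run's length is that id's frequency, and runs appear in sorted
--     # order, so no Counter, set() or per-list sort is needed.
--     ids = sorted(row['speaker_id'] for row in data)
--     valid_speaker_ids = []
--     invalid_speaker_ids = []
--     n = len(ids)
--     i = 0
--     while i < n:
--         j = i + 1
--         while j < n and ids[j] == ids[i]: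
--             j += 1
--         if j - i > min_freq:
--             valid_speaker_ids.append(ids[i])
--         else:
--             invalid_speaker_ids.append(ids[i])
--         i = j
--     return valid_speaker_ids, invalid_speaker_ids
-- ===== Notes on version B (the rewrite author's own statement) =====
-- stated objective: alternative
-- what changed: B drops the Counter/dict and the set()+sorted() post-processing entirely: it sorts the raw id list once and scans it in maximal runs of equal ids, the run length being the frequency, appending each run head to valid or invalid, so both lists come out sorted by construction.
import Mathlib
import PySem

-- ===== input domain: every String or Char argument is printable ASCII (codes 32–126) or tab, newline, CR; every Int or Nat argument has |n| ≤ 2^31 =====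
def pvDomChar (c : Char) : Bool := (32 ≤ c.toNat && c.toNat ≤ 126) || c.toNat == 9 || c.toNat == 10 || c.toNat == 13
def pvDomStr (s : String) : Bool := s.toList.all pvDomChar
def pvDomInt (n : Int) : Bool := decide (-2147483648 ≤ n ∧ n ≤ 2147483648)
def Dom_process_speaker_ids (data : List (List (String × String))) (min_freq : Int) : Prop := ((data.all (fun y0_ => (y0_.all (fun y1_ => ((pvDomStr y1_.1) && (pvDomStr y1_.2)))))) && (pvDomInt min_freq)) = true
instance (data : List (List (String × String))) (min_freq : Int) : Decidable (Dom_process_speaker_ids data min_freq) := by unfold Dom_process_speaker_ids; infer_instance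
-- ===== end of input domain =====

-- B replaces A's Counter + partition + set()/sorted() pipeline by one sort of the raw id
-- list followed by a single scan over maximal runs of equal ids (objective: alternative).

-- ===== PORT A =====
-- row['speaker_id'] (KeyError if absent is excluded by Pre_; getD "" never read under Pre_)
def process_speaker_ids (data : List (List (String × String))) (min_freq : Int) : List String × List String :=
  let speaker_ids := data.map (fun row => (PySem.Dict.get? (PySem.Dict.mk row) "speaker_id").getD "")
  let speaker_freq := PySem.Dict.counter speaker_ids
  let vi := speaker_freq.items.foldl
    (fun (vi : List String × List String) kv =>
      if kv.2 ≤ min_freq then (vi.1, vi.2 ++ [kv.1]) else (vi.1 ++ [kv.1], vi.2))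
    ([], [])
  (PySem.List.sorted (PySem.Set.ofList vi.1) (fun x => x) false,
   PySem.List.sorted (PySem.Set.ofList vi.2) (fun x => x) false)

-- ===== PORT B =====
-- B's inner `while j < n and ids[j] == ids[i]` run scan is takeWhile/dropWhile on the
-- remaining sorted list; the outer while-loop is the recursion on the remainder.
def psiRuns (min_freq : Int) : List String → List String × List String → List String × List String
  | [], acc => acc
  | x :: xs, (v, i) =>
      let same := xs.takeWhile (fun y => y == x)
      let rest := xs.dropWhile (fun y => y == x)
      if min_freq < 1 + (same.length : Int) then psiRuns min_freq rest (v ++ [x], i)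
      else psiRuns min_freq rest (v, i ++ [x])
termination_by l _ => l.length
decreasing_by
  · exact Nat.lt_succ_of_le (List.length_dropWhile_le _ _)
  · exact Nat.lt_succ_of_le (List.length_dropWhile_le _ _)

def process_speaker_ids_alt (data : List (List (String × String))) (min_freq : Int) : List String × List String :=
  let ids := PySem.List.sorted
    (data.map (fun row => (PySem.Dict.get? (PySem.Dict.mk row) "speaker_id").getD ""))
    (fun x => x) false
  psiRuns min_freq ids ([], [])

-- ===== PRECONDITION & SPEC =====
-- Pre_ excludes exactly the rows without a 'speaker_id' key, where Python A raises KeyError (B raises too).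
def Pre_process_speaker_ids (data : List (List (String × String))) (min_freq : Int) : Prop :=
  ∀ row ∈ data, (PySem.Dict.mk row).contains "speaker_id" = true
instance (data : List (List (String × String))) (min_freq : Int) : Decidable (Pre_process_speaker_ids data min_freq) := by unfold Pre_process_speaker_ids; infer_instance

def pvWitness_process_speaker_ids : (List (List (String × String))) × Int :=
  ([[("speaker_id", "a")], [("speaker_id", "b")], [("speaker_id", "a")]], 1)

def Spec_process_speaker_ids (data : List (List (String × String))) (min_freq : Int) (out : List String × List String) : Prop := out = process_speaker_ids_alt data min_freq
instance (data : List (List (String × String))) (min_freq : Int) (out : List String × List String) : Decidable (Spec_process_speaker_ids data min_freq out) := by unfold Spec_process_speaker_ids; infer_instance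

-- ===== CLAIM (what is proved, stated in full; the proofs are below) =====
def Claim_equal_process_speaker_ids : Prop := ∀ (data : List (List (String × String))) (min_freq : Int), Dom_process_speaker_ids data min_freq → Pre_process_speaker_ids data min_freq → Spec_process_speaker_ids data min_freq (process_speaker_ids data min_freq)

-- ===== LEMMAS AND PROOFS =====

-- A's loop: partition of counter items (pairs) into (valid, invalid) by frequency
lemma foldl_items_partition (min_freq : Int) (cnt : String → Int) (ks : List String)
    (v i : List String) :
    (ks.map (fun k => (k, cnt k))).foldl
        (fun (vi : List String × List String) kv =>
          if kv.2 ≤ min_freq then (vi.1, vi.2 ++ [kv.1]) else (vi.1 ++ [kv.1], vi.2)) (v, i)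
      = (v ++ ks.filter (fun k => decide (min_freq < cnt k)),
         i ++ ks.filter (fun k => decide (cnt k ≤ min_freq))) := by
  induction ks generalizing v i with
  | nil => simp
  | cons k ks ih =>
    by_cases h : min_freq < cnt k
    · simp [h, ih, not_le.mpr h]
    · simp [h, ih, not_lt.mp h]

-- sorting a filtered nodup set = filtering the sorted set (both strictly increasing)
lemma sorted_filter_comm (p : String → Bool) (xs : List String) :
    PySem.List.sorted ((PySem.Set.ofList xs).filter p) (fun x => x) false
      = (PySem.List.sorted (PySem.Set.ofList xs) (fun x => x) false).filter p := by
  apply PySem.List.sorted_eq_of_perm_of_pairwise_lt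
  · exact (PySem.List.sorted_perm _ _ _).filter p
  · exact (PySem.List.sorted_ofList_pairwise_lt xs).filter p

-- discard of an absent element is the identity
lemma discard_of_not_mem (s : List String) (x : String) (h : x ∉ s) :
    PySem.Set.discard s x = s := by
  simp only [PySem.Set.discard]
  apply List.filter_eq_self.mpr
  intro y hy
  have he : y ≠ x := fun he => h (he ▸ hy)
  simp [he]

-- set() of a leading run: the run head once, then the set of the remainder
lemma ofList_cons_run (x : String) (s r : List String)
    (hs : ∀ y ∈ s, y = x) (hr : x ∉ r) :
    PySem.Set.ofList (x :: (s ++ r)) = x :: PySem.Set.ofList r := by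
  have hnr : x ∉ PySem.Set.ofList r := fun h => hr ((PySem.Set.mem_ofList r x).mp h)
  induction s with
  | nil =>
    rw [List.nil_append, PySem.Set.ofList_cons, discard_of_not_mem _ _ hnr]
  | cons y s ih =>
    have hy : y = x := hs y (by simp)
    subst hy
    have ih' := ih (fun z hz => hs z (by simp [hz]))
    rw [List.cons_append, PySem.Set.ofList_cons, ih']
    have hstep : PySem.Set.discard (y :: PySem.Set.ofList r) y
        = PySem.Set.discard (PySem.Set.ofList r) y := by
      simp [PySem.Set.discard]
    rw [hstep, discard_of_not_mem _ _ hnr]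

-- set() keeps any pairwise relation of the underlying list
lemma pairwise_ofList {R : String → String → Prop} (l : List String)
    (h : l.Pairwise R) : (PySem.Set.ofList l).Pairwise R := by
  induction l with
  | nil => simp [PySem.Set.ofList]
  | cons x xs ih =>
    rw [PySem.Set.ofList_cons]
    rcases List.pairwise_cons.mp h with ⟨hx, hxs⟩
    have hsub : (PySem.Set.discard (PySem.Set.ofList xs) x).Sublist (PySem.Set.ofList xs) := by
      simp only [PySem.Set.discard]; exact List.filter_sublist
    refine List.pairwise_cons.mpr ⟨?_, List.Pairwise.sublist hsub (ih hxs)⟩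
    intro y hy
    exact hx y ((PySem.Set.mem_ofList xs y).mp (hsub.mem hy))

-- in a ≤-sorted list the run head does not reappear after its run
lemma not_mem_dropWhile_beq (x : String) (xs : List String)
    (hx : ∀ y ∈ xs, x ≤ y) (hxs : xs.Pairwise (· ≤ ·)) :
    x ∉ xs.dropWhile (fun y => y == x) := by
  induction xs with
  | nil => simp
  | cons y ys ih =>
    rcases List.pairwise_cons.mp hxs with ⟨hy, hys⟩
    by_cases hb : y = x
    · rw [List.dropWhile_cons, if_pos (by simp [hb])]
      exact ih (fun z hz => hx z (by simp [hz])) hys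
    · rw [List.dropWhile_cons, if_neg (by simp [hb])]
      intro hmem
      rcases List.mem_cons.mp hmem with he | ht
      · exact hb he.symm
      · exact hb (le_antisymm (hx y (by simp)) (hy x ht)).symm

-- B's run scan over a ≤-sorted list = A's two frequency filters over the set of that list
lemma psiRuns_bounded (m : Int) : ∀ (n : Nat) (l : List String), l.length ≤ n →
    l.Pairwise (· ≤ ·) → ∀ v i : List String,
    psiRuns m l (v, i)
      = (v ++ (PySem.Set.ofList l).filter (fun k => decide (m < (l.count k : Int))),
         i ++ (PySem.Set.ofList l).filter (fun k => decide ((l.count k : Int) ≤ m))) := by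
  intro n
  induction n with
  | zero =>
    intro l hl _ v i
    obtain rfl : l = [] := List.eq_nil_of_length_eq_zero (Nat.le_zero.mp hl)
    simp [psiRuns, PySem.Set.ofList]
  | succ n ih =>
    intro l hl hs v i
    match l, hl, hs with
    | [], _, _ => simp [psiRuns, PySem.Set.ofList]
    | x :: xs, hl, hs =>
      rcases List.pairwise_cons.mp hs with ⟨hx, hxs⟩
      set same := xs.takeWhile (fun y => y == x) with hsame_def
      set rest := xs.dropWhile (fun y => y == x) with hrest_def
      have hsplit : same ++ rest = xs := List.takeWhile_append_dropWhile
      have hsame : ∀ y ∈ same, y = x := by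
        intro y hy
        have hp := List.mem_takeWhile_imp (hsame_def ▸ hy)
        exact eq_of_beq hp
      have hrest_sub : rest.Sublist xs := hrest_def ▸ List.dropWhile_sublist (fun y => y == x)
      have hrest_pw : rest.Pairwise (· ≤ ·) := List.Pairwise.sublist hrest_sub hxs
      have hxrest : x ∉ rest := hrest_def ▸ not_mem_dropWhile_beq x xs hx hxs
      have hcx : (x :: xs).count x = same.length + 1 := by
        rw [List.count_cons_self, ← hsplit, List.count_append,
          List.count_eq_zero.mpr hxrest,
          List.count_eq_length.mpr (fun b hb => (hsame b hb).symm)]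
      have hck : ∀ k ∈ rest, (x :: xs).count k = rest.count k := by
        intro k hk
        have hkx : k ≠ x := fun he => hxrest (he ▸ hk)
        have hksame : k ∉ same := fun hksame => hkx (hsame k hksame)
        rw [← hsplit]
        simp [List.count_cons, List.count_append, List.count_eq_zero.mpr hksame]
        exact fun he => hkx he.symm
      have hofl : PySem.Set.ofList (x :: xs) = x :: PySem.Set.ofList rest := by
        rw [← hsplit]; exact ofList_cons_run x same rest hsame hxrest
      have hrlen : rest.length ≤ n := le_trans (List.length_dropWhile_le _ _)
        (Nat.le_of_succ_le_succ hl)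
      have hcast : (((x :: xs).count x : Nat) : Int) = 1 + (same.length : Int) := by
        rw [hcx]; push_cast; ring
      simp only [psiRuns]
      rw [← hsame_def, ← hrest_def]
      by_cases hcond : m < 1 + (same.length : Int)
      · rw [if_pos hcond, ih rest hrlen hrest_pw (v ++ [x]) i]
        refine Prod.ext ?_ ?_
        · show (v ++ [x]) ++ _ = v ++ _
          rw [hofl, List.filter_cons]
          have : decide (m < (((x :: xs).count x : Nat) : Int)) = true := by
            rw [hcast]; exact decide_eq_true hcond
          rw [this]
          simp only [List.append_assoc, List.singleton_append]
          congr 2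
          exact (List.filter_congr (fun k hk => by
            rw [hck k ((PySem.Set.mem_ofList rest k).mp hk)])).symm
        · show i ++ _ = i ++ _
          rw [hofl, List.filter_cons]
          have : decide ((((x :: xs).count x : Nat) : Int) ≤ m) = false := by
            rw [hcast]; exact decide_eq_false (not_le.mpr hcond)
          rw [this]
          simp only [Bool.false_eq_true, if_false]
          congr 1
          exact (List.filter_congr (fun k hk => by
            rw [hck k ((PySem.Set.mem_ofList rest k).mp hk)])).symm
      · rw [if_neg hcond, ih rest hrlen hrest_pw v (i ++ [x])]
        refine Prod.ext ?_ ?_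
        · show v ++ _ = v ++ _
          rw [hofl, List.filter_cons]
          have : decide (m < (((x :: xs).count x : Nat) : Int)) = false := by
            rw [hcast]; exact decide_eq_false hcond
          rw [this]
          simp only [Bool.false_eq_true, if_false]
          congr 1
          exact (List.filter_congr (fun k hk => by
            rw [hck k ((PySem.Set.mem_ofList rest k).mp hk)])).symm
        · show (i ++ [x]) ++ _ = i ++ _
          rw [hofl, List.filter_cons]
          have : decide ((((x :: xs).count x : Nat) : Int) ≤ m) = true := by
            rw [hcast]; exact decide_eq_true (not_lt.mp hcond)
          rw [this]
          simp only [List.append_assoc, List.singleton_append]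
          congr 2
          exact (List.filter_congr (fun k hk => by
            rw [hck k ((PySem.Set.mem_ofList rest k).mp hk)])).symm

lemma psiRuns_eq (m : Int) (l : List String) (hs : l.Pairwise (· ≤ ·)) (v i : List String) :
    psiRuns m l (v, i)
      = (v ++ (PySem.Set.ofList l).filter (fun k => decide (m < (l.count k : Int))),
         i ++ (PySem.Set.ofList l).filter (fun k => decide ((l.count k : Int) ≤ m))) :=
  psiRuns_bounded m l.length l le_rfl hs v i

theorem process_speaker_ids_spec : Claim_equal_process_speaker_ids := by
  intro data min_freq _ _
  show process_speaker_ids data min_freq = process_speaker_ids_alt data min_freq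
  unfold process_speaker_ids process_speaker_ids_alt
  set ids := data.map (fun row => (PySem.Dict.get? (PySem.Dict.mk row) "speaker_id").getD "") with hids
  simp only [PySem.Dict.items_counter]
  rw [foldl_items_partition min_freq (fun k => ((ids.count k : Nat) : Int))]
  simp only [List.nil_append]
  set l := PySem.List.sorted ids (fun x => x) false with hl
  have hperm : l.Perm ids := PySem.List.sorted_perm _ _ _
  have hpair : l.Pairwise (· ≤ ·) := PySem.List.sorted_pairwise ids (fun x => x)
  rw [psiRuns_eq min_freq l hpair [] []]
  simp only [List.nil_append]
  have hset : PySem.List.sorted (PySem.Set.ofList ids) (fun x => x) false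
      = PySem.Set.ofList l := by
    apply PySem.List.sorted_eq_of_perm_of_pairwise_lt
    · exact (List.perm_ext_iff_of_nodup (PySem.Set.nodup_ofList l)
        (PySem.Set.nodup_ofList ids)).mpr
        (fun a => by simp [PySem.Set.mem_ofList, hperm.mem_iff])
    · exact ((pairwise_ofList l hpair).and
        (PySem.Set.nodup_ofList l)).imp (fun h => lt_of_le_of_ne h.1 h.2)
  have hcnt : ∀ k, l.count k = ids.count k := fun k => hperm.count_eq k
  refine Prod.ext ?_ ?_
  · show PySem.List.sorted (PySem.Set.ofList _) _ _ = _
    rw [PySem.Set.ofList_eq_self_of_nodup _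
      (((PySem.Set.nodup_ofList ids)).filter _), sorted_filter_comm, hset]
    exact List.filter_congr (fun k _ => by simp [hcnt])
  · show PySem.List.sorted (PySem.Set.ofList _) _ _ = _
    rw [PySem.Set.ofList_eq_self_of_nodup _
      (((PySem.Set.nodup_ofList ids)).filter _), sorted_filter_comm, hset]
    exact List.filter_congr (fun k _ => by simp [hcnt])
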